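-- pv_equiv track=rewrite | github.com/dj-foxxy/advent-of-code | 2015/05/aoc.py | is_nice_v2
-- ===== SOURCE A (Python) =====
-- def is_nice_v2(word: str) -> bool:
--     c_1 = ''
--     c_2 = ''
--     c_3 = ''
--     pairs: set[str] = set()
--     rule_1 = rule_2 = False
--     for c in word:
--         if not rule_1:
--             pairs.add(f'{c_3}{c_2}')
--             if f'{c_1}{c}' in pairs:
--                 rule_1 = True
--         if not rule_2 and c == c_2:
--             rule_2 = True
--         if rule_1 and rule_2:
--             return True
--         c_3, c_2, c_1 = c_2, c_1, c
--     return False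
-- ===== SOURCE B (Python) =====
-- def is_nice_v2(word: str) -> bool:
--     rule_1 = any(word[i:i + 2] in word[i + 2:] for i in range(len(word) - 1))
--     rule_2 = any(word[i] == word[i + 2] for i in range(len(word) - 2))
--     return rule_1 and rule_2
-- ===== Notes on version B (the rewrite author's own statement) =====
-- stated objective: simpler
-- what changed: Replaces A's single fused pass (rolling 3-char window, latching flags and an accumulated set of seen pairs with early exit) by two independent direct scans: rule 1 via substring search of each 2-char pair in the remainder of the string, rule 2 via a positional equality check word[i] == word[i+2].
import Mathlib
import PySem

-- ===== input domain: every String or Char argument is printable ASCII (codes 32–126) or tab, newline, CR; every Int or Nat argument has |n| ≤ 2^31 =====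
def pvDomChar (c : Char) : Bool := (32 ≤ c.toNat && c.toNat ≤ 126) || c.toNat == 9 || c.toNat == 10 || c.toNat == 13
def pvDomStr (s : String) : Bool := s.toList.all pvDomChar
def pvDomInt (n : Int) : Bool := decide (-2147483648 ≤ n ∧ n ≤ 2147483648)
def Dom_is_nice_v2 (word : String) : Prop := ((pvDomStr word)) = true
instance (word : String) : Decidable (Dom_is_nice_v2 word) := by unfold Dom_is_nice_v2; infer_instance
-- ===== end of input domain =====

-- B computes the two 'nice' rules by two independent direct scans (substring search per pair,
-- positional equality) instead of A's single fused pass with a rolling window, a seen-pair set,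
-- latching flags and an early exit; objective: simpler.


-- ===== PORT A =====
-- A's loop over the characters; the short Python strings c_1/c_2/c_3 (each '' or one char) and the
-- set elements (strings of length ≤ 2) are modelled as List Char, f-string concatenation as ++,
-- 'c == c_2' as [c] == c2 (exact: Python compares the 1-char string with c_2).
def pvALoop : List Char → List Char → List Char → List Char → PySem.Set (List Char) → Bool → Bool → Bool
  | [], _, _, _, _, _, _ => false
  | c :: cs, c1, c2, c3, pairs, r1, r2 =>
    let pairs' := if !r1 then PySem.Set.add pairs (c3 ++ c2) else pairs
    let r1' := if !r1 && PySem.Set.contains pairs' (c1 ++ [c]) then true else r1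
    let r2' := if !r2 && ([c] == c2) then true else r2
    if r1' && r2' then true
    else pvALoop cs [c] c1 c2 pairs' r1' r2'

def is_nice_v2 (word : String) : Bool :=
  pvALoop word.toList [] [] [] PySem.Set.empty false false

-- ===== PORT B =====
-- rule_1 = any(word[i:i+2] in word[i+2:] for i in range(len(word)-1))
-- rule_2 = any(word[i] == word[i+2] for i in range(len(word)-2))   (indices always in range)
def is_nice_v2_alt (word : String) : Bool :=
  let s := word.toList
  let n : Int := s.length
  let rule1 := (PySem.List.pyRange 0 (n - 1) 1).any (fun i =>
    PySem.Chars.isIn (PySem.List.slice s (some i) (some (i + 2))) (PySem.List.slice s (some (i + 2)) none))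
  let rule2 := (PySem.List.pyRange 0 (n - 2) 1).any (fun i =>
    PySem.List.pyGet? s i == PySem.List.pyGet? s (i + 2))
  rule1 && rule2

-- ===== PRECONDITION & SPEC =====
def Spec_is_nice_v2 (word : String) (out : Bool) : Prop := out = is_nice_v2_alt word
instance (word : String) (out : Bool) : Decidable (Spec_is_nice_v2 word out) := by unfold Spec_is_nice_v2; infer_instance

-- ===== CLAIM (what is proved, stated in full; the proofs are below) =====
def Claim_equal_is_nice_v2 : Prop := ∀ (word : String), Dom_is_nice_v2 word → Spec_is_nice_v2 word (is_nice_v2 word)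

-- ===== LEMMAS AND PROOFS =====

-- canonical state of A's loop after processing prefix p
def pvC1 (p : List Char) : List Char := p.reverse.take 1
def pvC2 (p : List Char) : List Char := (p.reverse.drop 1).take 1
def pvC3 (p : List Char) : List Char := (p.reverse.drop 2).take 1
def pvKey (p : List Char) : List Char := pvC3 p ++ pvC2 p
def pvKeys (p : List Char) : List (List Char) := (List.range p.length).map (fun t => pvKey (p.take t))
def pvCanon (p : List Char) : PySem.Set (List Char) := PySem.Set.ofList (pvKeys p)

-- the two latching conditions of A's loop, as pure functions of prefix and remainder
def pvF1 : List Char → List Char → Bool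
  | _, [] => false
  | p, c :: cs => PySem.Set.contains (pvCanon (p ++ [c])) (pvC1 p ++ [c]) || pvF1 (p ++ [c]) cs
def pvF2 : List Char → List Char → Bool
  | _, [] => false
  | p, c :: cs => ([c] == pvC2 p) || pvF2 (p ++ [c]) cs

lemma pvKeys_snoc (p : List Char) (c : Char) : pvKeys (p ++ [c]) = pvKeys p ++ [pvKey p] := by
  unfold pvKeys
  rw [List.length_append, List.length_singleton, List.range_succ, List.map_append]
  congr 1
  · apply List.map_congr_left
    intro t ht
    rw [List.mem_range] at ht
    rw [List.take_append_of_le_length (by omega)]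
  · simp

lemma pvCanon_snoc (p : List Char) (c : Char) :
    pvCanon (p ++ [c]) = PySem.Set.add (pvCanon p) (pvKey p) := by
  rw [pvCanon, pvKeys_snoc, PySem.Set.ofList_append_singleton]; rfl

lemma pvALoop_eq (rest : List Char) : ∀ (p : List Char) (pairs : PySem.Set (List Char)) (r1 r2 : Bool),
    (r1 = false → pairs = pvCanon p) → (r1 && r2) = false →
    pvALoop rest (pvC1 p) (pvC2 p) (pvC3 p) pairs r1 r2 = ((r1 || pvF1 p rest) && (r2 || pvF2 p rest)) := by
  induction rest with
  | nil =>
    intro p pairs r1 r2 _ h2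
    cases r1 <;> cases r2 <;> simp_all [pvALoop, pvF1, pvF2]
  | cons c cs ih =>
    intro p pairs r1 r2 h h2
    have e1 : pvC1 (p ++ [c]) = [c] := by simp [pvC1]
    have e2 : pvC2 (p ++ [c]) = pvC1 p := by simp [pvC2, pvC1]
    have e3 : pvC3 (p ++ [c]) = pvC2 p := by simp [pvC3, pvC2]
    cases r1 with
    | true =>
      have hr2 : r2 = false := by simpa using h2
      subst hr2
      cases hc2 : ([c] == pvC2 p) with
      | true =>
        simp [pvALoop, pvF1, pvF2, hc2]
      | false =>
        have hih := ih (p ++ [c]) pairs true false (by simp) (by simp)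
        rw [e1, e2, e3] at hih
        simp [pvALoop, pvF1, pvF2, hc2, hih]
    | false =>
      have hp : pairs = pvCanon p := h rfl
      subst hp
      have hadd : PySem.Set.add (pvCanon p) (pvC3 p ++ pvC2 p) = pvCanon (p ++ [c]) :=
        (pvCanon_snoc p c).symm
      by_cases hc1 : (pvC1 p ++ [c]) ∈ pvCanon (p ++ [c])
      · cases hr2 : (r2 || ([c] == pvC2 p)) with
        | true =>
          cases r2 <;> cases hc2 : ([c] == pvC2 p)
          · simp_all
          · simp_all [pvALoop, pvF1, pvF2]
          · simp_all [pvALoop, pvF1, pvF2]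
          · simp_all [pvALoop, pvF1, pvF2]
        | false =>
          have hb : r2 = false ∧ ([c] == pvC2 p) = false := by
            constructor <;> cases r2 <;> cases hc2 : ([c] == pvC2 p) <;> simp_all
          obtain ⟨hb1, hb2⟩ := hb
          subst hb1
          have hih := ih (p ++ [c]) (pvCanon (p ++ [c])) true false (by simp) (by simp)
          rw [e1, e2, e3] at hih
          have hct : PySem.Set.contains (pvCanon (p ++ [c])) (pvC1 p ++ [c]) = true := by
            rw [PySem.Set.contains_iff]; exact hc1
          simp only [PySem.Set.contains_iff] at hct
          simp [pvALoop, pvF1, pvF2, hadd, hct, hb2, hih]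
      · have hcf : PySem.Set.contains (pvCanon (p ++ [c])) (pvC1 p ++ [c]) = false := by
          simpa [PySem.Set.contains_iff] using hc1
        have hih := ih (p ++ [c]) (pvCanon (p ++ [c])) false (r2 || ([c] == pvC2 p))
          (fun _ => rfl) (by simp)
        rw [e1, e2, e3] at hih
        simp only [pvALoop, pvF1, pvF2]
        rw [hadd, hcf]
        have hdc : (decide ([c] = pvC2 p)) = ([c] == pvC2 p) := by
          rw [Bool.eq_iff_iff]; simp
        cases r2 <;> simp_all
def pvQ1 (s : List Char) (k : Nat) : Prop :=
  k < s.length ∧ (pvC1 (s.take k) ++ (s.drop k).take 1) ∈ pvKeys (s.take (k + 1))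
def pvQ2 (s : List Char) (k : Nat) : Prop :=
  k < s.length ∧ (s.drop k).take 1 = pvC2 (s.take k)

lemma pvF2_iff (rest : List Char) : ∀ p : List Char,
    pvF2 p rest = true ↔ ∃ k, p.length ≤ k ∧ pvQ2 (p ++ rest) k := by
  induction rest with
  | nil =>
    intro p
    simp only [pvF2, pvQ2, List.append_nil]
    constructor
    · intro h; cases h
    · rintro ⟨k, hk, hk2, -⟩; omega
  | cons c cs ih =>
    intro p
    have h1 : (p ++ c :: cs).take p.length = p := List.take_left ..
    have h2 : (p ++ c :: cs).drop p.length = c :: cs := List.drop_left ..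
    have hhead : (([c] == pvC2 p) = true) ↔ pvQ2 (p ++ c :: cs) p.length := by
      simp [pvQ2, h1, h2]
    rw [pvF2, Bool.or_eq_true, hhead, ih (p ++ [c])]
    rw [show (p ++ [c]) ++ cs = p ++ c :: cs from by simp]
    constructor
    · rintro (hq | ⟨k, hk, hq⟩)
      · exact ⟨p.length, le_refl _, hq⟩
      · exact ⟨k, by simp at hk; omega, hq⟩
    · rintro ⟨k, hk, hq⟩
      by_cases hke : k = p.length
      · subst hke; exact Or.inl hq
      · exact Or.inr ⟨k, by simp; omega, hq⟩

lemma pvF1_iff (rest : List Char) : ∀ p : List Char,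
    pvF1 p rest = true ↔ ∃ k, p.length ≤ k ∧ pvQ1 (p ++ rest) k := by
  induction rest with
  | nil =>
    intro p
    simp only [pvF1, pvQ1, List.append_nil]
    constructor
    · intro h; cases h
    · rintro ⟨k, hk, hk2, -⟩; omega
  | cons c cs ih =>
    intro p
    have h1 : (p ++ c :: cs).take p.length = p := List.take_left ..
    have h2 : (p ++ c :: cs).drop p.length = c :: cs := List.drop_left ..
    have h3 : (p ++ c :: cs).take (p.length + 1) = p ++ [c] := by
      rw [show p ++ c :: cs = (p ++ [c]) ++ cs from by simp]
      exact List.take_left' (by simp)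
    have hhead : (PySem.Set.contains (pvCanon (p ++ [c])) (pvC1 p ++ [c]) = true)
        ↔ pvQ1 (p ++ c :: cs) p.length := by
      rw [PySem.Set.contains_iff, pvCanon, PySem.Set.mem_ofList, pvQ1, h1, h2, h3]
      simp
    rw [pvF1, Bool.or_eq_true, hhead, ih (p ++ [c])]
    rw [show (p ++ [c]) ++ cs = p ++ c :: cs from by simp]
    constructor
    · rintro (hq | ⟨k, hk, hq⟩)
      · exact ⟨p.length, le_refl _, hq⟩
      · exact ⟨k, by simp at hk; omega, hq⟩
    · rintro ⟨k, hk, hq⟩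
      by_cases hke : k = p.length
      · subst hke; exact Or.inl hq
      · exact Or.inr ⟨k, by simp; omega, hq⟩
lemma pvTakeOneDrop (s : List Char) (k : Nat) : (s.drop k).take 1 = s[k]?.toList := by
  induction s generalizing k with
  | nil => simp
  | cons a t ih =>
    cases k with
    | zero => simp
    | succ k => simpa using ih k

lemma pvTakeOne (l : List Char) : l.take 1 = l[0]?.toList := by
  simpa using pvTakeOneDrop l 0

lemma pvRevTake (s : List Char) (t d : Nat) (ht : t ≤ s.length) :
    ((s.take t).reverse)[d]? = if d < t then s[t - 1 - d]? else none := by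
  by_cases hd : d < t
  · rw [List.getElem?_reverse (by rw [List.length_take]; omega)]
    rw [List.length_take, List.getElem?_take_of_lt (by omega)]
    simp only [hd, if_true]
    congr 1
    omega
  · rw [List.getElem?_eq_none (by simp; omega)]
    simp [hd]

lemma pvOptToList_inj {a b : Option Char} (h : a.toList = b.toList) : a = b := by
  cases a <;> cases b <;> simp_all

def pvP1 (s : List Char) : Prop :=
  ∃ i j : Nat, i + 2 ≤ j ∧ j + 1 < s.length ∧ s[i]? = s[j]? ∧ s[i + 1]? = s[j + 1]?
def pvP2 (s : List Char) : Prop := ∃ i : Nat, i + 2 < s.length ∧ s[i]? = s[i + 2]?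

lemma pvC2_take (s : List Char) (k : Nat) (hk : k ≤ s.length) :
    pvC2 (s.take k) = (if 1 < k then s[k - 2]? else none).toList := by
  rw [pvC2, pvTakeOneDrop ((s.take k).reverse) 1, pvRevTake s k 1 hk,
    show k - 1 - 1 = k - 2 from by omega]

lemma pvQ2_exists_iff (s : List Char) : (∃ k, pvQ2 s k) ↔ pvP2 s := by
  constructor
  · rintro ⟨k, hk, heq⟩
    rw [pvTakeOneDrop, pvC2_take s k (by omega)] at heq
    by_cases h2 : 1 < k
    · rw [if_pos h2] at heq
      refine ⟨k - 2, by omega, ?_⟩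
      have := pvOptToList_inj heq
      rw [show k - 2 + 2 = k from by omega]
      exact this.symm
    · rw [if_neg h2] at heq
      rw [List.getElem?_eq_getElem hk] at heq
      simp at heq
  · rintro ⟨i, hi, heq⟩
    refine ⟨i + 2, hi, ?_⟩
    rw [pvTakeOneDrop, pvC2_take s (i + 2) (by omega)]
    rw [if_pos (by omega)]
    simp only [Nat.add_sub_cancel]
    exact congrArg Option.toList heq.symm
lemma pvKey_take (s : List Char) (t : Nat) (ht : t ≤ s.length) :
    pvKey (s.take t) = (if 2 < t then s[t - 3]? else none).toList
      ++ (if 1 < t then s[t - 2]? else none).toList := by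
  rw [pvKey, pvC2_take s t ht, pvC3]
  rw [pvTakeOneDrop ((s.take t).reverse) 2, pvRevTake s t 2 ht]
  rw [show t - 1 - 2 = t - 3 from by omega]

lemma pvKeys_take (s : List Char) (k : Nat) (hk : k < s.length) :
    pvKeys (s.take (k + 1)) = (List.range (k + 1)).map (fun t => pvKey (s.take t)) := by
  rw [pvKeys, List.length_take]
  rw [show min (k + 1) s.length = k + 1 from by omega]
  apply List.map_congr_left
  intro t ht
  rw [List.mem_range] at ht
  rw [List.take_take, min_eq_left (by omega)]

lemma pvQ1_exists_iff (s : List Char) : (∃ k, pvQ1 s k) ↔ pvP1 s := by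
  constructor
  · rintro ⟨k, hk, hmem⟩
    rw [pvKeys_take s k hk, List.mem_map] at hmem
    obtain ⟨t, htmem, hkey⟩ := hmem
    rw [List.mem_range] at htmem
    rw [pvKey_take s t (by omega)] at hkey
    rw [pvC1, pvTakeOne, pvRevTake s k 0 (by omega), pvTakeOneDrop] at hkey
    rw [List.getElem?_eq_getElem hk, Nat.sub_zero] at hkey
    by_cases h3 : 2 < t
    · rw [if_pos h3, if_pos (by omega)] at hkey
      have ht3 : t - 3 < s.length := by omega
      have ht2 : t - 2 < s.length := by omega
      rw [List.getElem?_eq_getElem ht3, List.getElem?_eq_getElem ht2] at hkey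
      by_cases hk0 : 0 < k
      · rw [if_pos hk0] at hkey
        have hk1 : k - 1 < s.length := by omega
        rw [List.getElem?_eq_getElem hk1] at hkey
        simp only [Option.toList_some, List.cons_append, List.nil_append,
          List.cons.injEq, and_true] at hkey
        obtain ⟨ha, hb⟩ := hkey
        refine ⟨t - 3, k - 1, by omega, by omega, ?_, ?_⟩
        · rw [List.getElem?_eq_getElem ht3, List.getElem?_eq_getElem hk1, ha]
        · rw [show t - 3 + 1 = t - 2 from by omega, show k - 1 + 1 = k from by omega,
            List.getElem?_eq_getElem ht2, List.getElem?_eq_getElem hk, hb]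
      · rw [if_neg hk0] at hkey
        have hlen := congrArg List.length hkey
        simp at hlen
    · rw [if_neg h3] at hkey
      by_cases h2 : 1 < t
      · -- key has length 1, x has length ≥ 1 with last element s[k]; forces k = 0 but t ≤ k
        rw [if_pos h2, List.getElem?_eq_getElem (show t - 2 < s.length from by omega)] at hkey
        by_cases hk0 : 0 < k
        · rw [if_pos hk0, List.getElem?_eq_getElem (show k - 1 < s.length from by omega)] at hkey
          have hlen := congrArg List.length hkey
          simp at hlen
        · omega
      · rw [if_neg h2] at hkey
        have hlen := congrArg List.length hkey
        simp at hlen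
  · rintro ⟨i, j, hij, hjn, he1, he2⟩
    refine ⟨j + 1, by omega, ?_⟩
    rw [pvKeys_take s (j + 1) (by omega), List.mem_map]
    refine ⟨i + 3, by rw [List.mem_range]; omega, ?_⟩
    rw [pvKey_take s (i + 3) (by omega)]
    rw [pvC1, pvTakeOne, pvRevTake s (j + 1) 0 (by omega), pvTakeOneDrop]
    rw [if_pos (by omega), if_pos (by omega), if_pos (by omega)]
    rw [show i + 3 - 3 = i from by omega, show i + 3 - 2 = i + 1 from by omega,
      show j + 1 - 1 - 0 = j from by omega, he1, he2]
lemma pvTakeTwoDrop (s : List Char) (k : Nat) :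
    (s.drop k).take 2 = s[k]?.toList ++ s[k + 1]?.toList := by
  induction s generalizing k with
  | nil => simp
  | cons a t ih =>
    cases k with
    | zero =>
      simp only [List.drop_zero, List.getElem?_cons_zero, List.getElem?_cons_succ]
      cases t
      · simp
      · simp
    | succ k => simpa using ih k

lemma pvPairPrefix (a b : Char) (l : List Char) :
    [a, b] <+: l ↔ l[0]? = some a ∧ l[1]? = some b := by
  cases l with
  | nil => simp
  | cons x xs =>
    cases xs with
    | nil => simp [List.cons_prefix_cons]
    | cons y ys => simp [List.cons_prefix_cons, eq_comm]

lemma pvAlt_r2_iff (s : List Char) :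
    ((PySem.List.pyRange 0 ((s.length : Int) - 2) 1).any (fun i =>
      PySem.List.pyGet? s i == PySem.List.pyGet? s (i + 2))) = true ↔ pvP2 s := by
  rw [List.any_eq_true]
  constructor
  · rintro ⟨i, hmem, hb⟩
    rw [PySem.List.mem_pyRange_one] at hmem
    obtain ⟨m, rfl⟩ := Int.eq_ofNat_of_zero_le hmem.1
    have hm : m + 2 < s.length := by omega
    rw [show ((m : Int) + 2) = ((m + 2 : Nat) : Int) from by push_cast; ring] at hb
    rw [PySem.List.pyGet?_natCast, PySem.List.pyGet?_natCast, beq_iff_eq] at hb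
    exact ⟨m, hm, hb⟩
  · rintro ⟨m, hm, he⟩
    refine ⟨(m : Int), ?_, ?_⟩
    · rw [PySem.List.mem_pyRange_one]; omega
    · rw [show ((m : Int) + 2) = ((m + 2 : Nat) : Int) from by push_cast; ring]
      rw [PySem.List.pyGet?_natCast, PySem.List.pyGet?_natCast, beq_iff_eq]
      exact he

lemma pvAlt_r1_iff (s : List Char) :
    ((PySem.List.pyRange 0 ((s.length : Int) - 1) 1).any (fun i =>
      PySem.Chars.isIn (PySem.List.slice s (some i) (some (i + 2))) (PySem.List.slice s (some (i + 2)) none))) = true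
    ↔ pvP1 s := by
  rw [List.any_eq_true]
  constructor
  · rintro ⟨i, hmem, hb⟩
    rw [PySem.List.mem_pyRange_one] at hmem
    obtain ⟨m, rfl⟩ := Int.eq_ofNat_of_zero_le hmem.1
    have hm : m + 1 < s.length := by omega
    rw [show ((m : Int) + 2) = ((m + 2 : Nat) : Int) from by push_cast; ring,
      PySem.List.slice_natCast, PySem.List.slice_from_natCast,
      show m + 2 - m = 2 from by omega] at hb
    rw [← PySem.Chars.exists_prefix_drop_iff_isIn] at hb
    obtain ⟨j, hpre⟩ := hb
    rw [List.drop_drop] at hpre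
    rw [pvTakeTwoDrop, List.getElem?_eq_getElem (by omega : m < s.length),
      List.getElem?_eq_getElem hm] at hpre
    rw [show (some s[m]).toList ++ (some s[m + 1]).toList = [s[m], s[m + 1]] from rfl,
      pvPairPrefix] at hpre
    obtain ⟨h0, h1⟩ := hpre
    rw [List.getElem?_drop] at h0
    rw [List.getElem?_drop] at h1
    simp only [Nat.add_zero] at h0
    obtain ⟨hl, -⟩ := List.getElem?_eq_some_iff.mp h1
    refine ⟨m, m + 2 + j, by omega, by omega, ?_, ?_⟩
    · rw [h0, List.getElem?_eq_getElem (by omega : m < s.length)]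
    · rw [h1, List.getElem?_eq_getElem hm]
  · rintro ⟨i, j, hij, hjn, he1, he2⟩
    have hi : i < s.length := by omega
    have hi1 : i + 1 < s.length := by omega
    refine ⟨(i : Int), ?_, ?_⟩
    · rw [PySem.List.mem_pyRange_one]
      constructor
      · exact_mod_cast Int.natCast_nonneg i
      · have : (i : Int) < (s.length : Int) - 1 := by
          have : i + 1 < s.length := by omega
          omega
        exact this
    · rw [show ((i : Int) + 2) = ((i + 2 : Nat) : Int) from by push_cast; ring,
        PySem.List.slice_natCast, PySem.List.slice_from_natCast,
        show i + 2 - i = 2 from by omega]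
      rw [← PySem.Chars.exists_prefix_drop_iff_isIn]
      refine ⟨j - (i + 2), ?_⟩
      rw [List.drop_drop, pvTakeTwoDrop, List.getElem?_eq_getElem hi,
        List.getElem?_eq_getElem hi1,
        show (some s[i]).toList ++ (some s[i + 1]).toList = [s[i], s[i + 1]] from rfl,
        pvPairPrefix]
      constructor
      · rw [List.getElem?_drop, show i + 2 + (j - (i + 2)) + 0 = j from by omega,
          ← he1, List.getElem?_eq_getElem hi]
      · rw [List.getElem?_drop, show i + 2 + (j - (i + 2)) + 1 = j + 1 from by omega,
          ← he2, List.getElem?_eq_getElem hi1]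

-- ===== VERDICT (by name: the statement is the Claim_ definition above) =====
theorem is_nice_v2_spec : Claim_equal_is_nice_v2 := by
  intro word _
  unfold Spec_is_nice_v2
  set s := word.toList with hs
  have hA : is_nice_v2 word = (pvF1 [] s && pvF2 [] s) := by
    have := pvALoop_eq s [] PySem.Set.empty false false (by intro _; rfl) rfl
    simpa [is_nice_v2, pvC1, pvC2, pvC3, hs] using this
  have h1 : pvF1 [] s = ((PySem.List.pyRange 0 ((s.length : Int) - 1) 1).any (fun i =>
      PySem.Chars.isIn (PySem.List.slice s (some i) (some (i + 2))) (PySem.List.slice s (some (i + 2)) none))) := by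
    rw [Bool.eq_iff_iff, pvAlt_r1_iff, pvF1_iff]
    simp [pvQ1_exists_iff]
  have h2 : pvF2 [] s = ((PySem.List.pyRange 0 ((s.length : Int) - 2) 1).any (fun i =>
      PySem.List.pyGet? s i == PySem.List.pyGet? s (i + 2))) := by
    rw [Bool.eq_iff_iff, pvAlt_r2_iff, pvF2_iff]
    simp [pvQ2_exists_iff]
  rw [hA, is_nice_v2_alt, h1, h2]
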